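-- pv_equiv track=rewrite | github.com/deekshithareddyaknapuram/DSA-with-python | basketball.py | max_score_subarray
-- ===== SOURCE A (Python) =====
-- def max_score_subarray(n,k,a):
--     max_score=0
--     for i in range(n-k+1):
--         current_score=0
--         for j in range(k):
--             current_score+=(j+1)*a[i+j]
--         max_score=max(max_score,current_score)
--     return max_score
-- ===== SOURCE B (Python) =====
-- def max_score_subarray(n, k, a):
--     # Sliding window: keep the weighted score `cur` and the plain window sum `win`;
--     # moving the window right one step: cur' = cur - win + k*a[i+k], win' = win - a[i] + a[i+k].
--     if k <= 0 or n - k + 1 <= 0: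
--         return 0
--     cur = 0
--     win = 0
--     for j in range(k):
--         cur += (j + 1) * a[j]
--         win += a[j]
--     best = max(0, cur)
--     for i in range(n - k):
--         cur = cur - win + k * a[i + k]
--         win = win - a[i] + a[i + k]
--         best = max(best, cur)
--     return best
-- ===== Notes on version B (the rewrite author's own statement) =====
-- stated objective: alternative
-- what changed: Replaced A's per-window recomputation of the weighted score (a fresh inner loop over k elements for every start) by a sliding window that updates the weighted score incrementally from the plain window sum (cur' = cur - win + k*a[i+k]); trades the inner loop for two running accumulators.
import Mathlib
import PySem

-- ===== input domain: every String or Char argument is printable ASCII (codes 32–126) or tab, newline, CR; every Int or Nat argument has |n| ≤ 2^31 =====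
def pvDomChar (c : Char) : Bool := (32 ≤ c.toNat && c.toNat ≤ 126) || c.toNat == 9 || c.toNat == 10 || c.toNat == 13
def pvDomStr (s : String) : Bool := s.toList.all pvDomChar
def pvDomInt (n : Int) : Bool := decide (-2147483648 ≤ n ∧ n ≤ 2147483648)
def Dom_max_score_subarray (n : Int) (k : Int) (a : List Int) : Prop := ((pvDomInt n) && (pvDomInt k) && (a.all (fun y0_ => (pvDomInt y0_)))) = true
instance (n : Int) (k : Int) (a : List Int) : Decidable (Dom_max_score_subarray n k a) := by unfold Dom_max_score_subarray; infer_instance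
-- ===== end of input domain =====

-- B replaces A's per-window recomputation of the weighted score by a sliding window that
-- updates the score incrementally from the plain window sum (alternative algorithm).


-- ===== PORT A =====
-- a[i+j] is ported with pyGetD (default 0); Pre_ excludes exactly the inputs where Python's
-- a[i+j] would raise IndexError, so the default is never read inside Pre_.
def max_score_subarray (n : Int) (k : Int) (a : List Int) : Int :=
  (PySem.List.pyRange 0 (n - k + 1) 1).foldl
    (fun max_score i =>
      let current_score :=
        (PySem.List.pyRange 0 k 1).foldl
          (fun c j => c + (j + 1) * PySem.List.pyGetD a (i + j) 0) 0
      max max_score current_score)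
    0

-- ===== PORT B =====
def max_score_subarray_alt (n : Int) (k : Int) (a : List Int) : Int :=
  if k ≤ 0 ∨ n - k + 1 ≤ 0 then 0
  else
    let cw :=
      (PySem.List.pyRange 0 k 1).foldl
        (fun (s : Int × Int) j =>
          (s.1 + (j + 1) * PySem.List.pyGetD a j 0, s.2 + PySem.List.pyGetD a j 0))
        (0, 0)
    let st :=
      (PySem.List.pyRange 0 (n - k) 1).foldl
        (fun (s : Int × Int × Int) i =>
          let cur := s.1 - s.2.1 + k * PySem.List.pyGetD a (i + k) 0
          let win := s.2.1 - PySem.List.pyGetD a i 0 + PySem.List.pyGetD a (i + k) 0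
          (cur, win, max s.2.2 cur))
        (cw.1, cw.2, max 0 cw.1)
    st.2.2

-- ===== PRECONDITION & SPEC =====
-- Pre_ excludes exactly the inputs on which Python A raises IndexError (a[i+j] past the end);
-- B raises there as well.
def Pre_max_score_subarray (n : Int) (k : Int) (a : List Int) : Prop :=
  (1 ≤ k ∧ k ≤ n) → n ≤ (a.length : Int)
instance (n : Int) (k : Int) (a : List Int) : Decidable (Pre_max_score_subarray n k a) := by
  unfold Pre_max_score_subarray; infer_instance

def pvWitness_max_score_subarray : Int × Int × List Int := (4, 2, [1, -2, 3, 4])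

def Spec_max_score_subarray (n : Int) (k : Int) (a : List Int) (out : Int) : Prop := out = max_score_subarray_alt n k a
instance (n : Int) (k : Int) (a : List Int) (out : Int) : Decidable (Spec_max_score_subarray n k a out) := by unfold Spec_max_score_subarray; infer_instance

-- ===== CLAIM (what is proved, stated in full; the proofs are below) =====
def Claim_equal_max_score_subarray : Prop := ∀ (n : Int) (k : Int) (a : List Int), Dom_max_score_subarray n k a → Pre_max_score_subarray n k a → Spec_max_score_subarray n k a (max_score_subarray n k a)

-- ===== LEMMAS AND PROOFS =====

-- x t abbreviates the (totalized) element access a[t].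
-- Weighted window score starting at i, and plain window sum starting at i, over K elements.
def pvW (x : Int → Int) (K : Nat) (i : Int) : Int :=
  ∑ j ∈ Finset.range K, ((j : Int) + 1) * x (i + j)
def pvS (x : Int → Int) (K : Nat) (i : Int) : Int :=
  ∑ j ∈ Finset.range K, x (i + j)

-- Sliding identities (pure algebra, no bounds needed).
theorem pvW_succ (x : Int → Int) (K : Nat) (i : Int) :
    pvW x K (i + 1) = pvW x K i - pvS x K i + K * x (i + K) := by
  induction K with
  | zero => simp [pvW, pvS]
  | succ K ih =>
    simp only [pvW, pvS, Finset.sum_range_succ] at *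
    have h1 : i + 1 + (K : Int) = i + ((K : Int) + 1) := by ring
    have h2 : i + ((K : Nat) + 1 : Nat) = i + ((K : Int) + 1) := by push_cast; ring
    rw [h2] at *
    rw [h1] at *
    push_cast
    linarith [ih]

theorem pvS_succ (x : Int → Int) (K : Nat) (i : Int) :
    pvS x K (i + 1) = pvS x K i - x i + x (i + K) := by
  induction K with
  | zero => simp [pvS]
  | succ K ih =>
    simp only [pvS, Finset.sum_range_succ] at *
    have h1 : i + 1 + (K : Int) = i + ((K : Int) + 1) := by ring
    have h2 : i + ((K : Nat) + 1 : Nat) = i + ((K : Int) + 1) := by push_cast; ring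
    rw [h2, h1, ih]; ring

-- List-fold sums over pyRange 0 k equal the Finset sums.
theorem sum_map_range_eq_finset (f : Int → Int) (K : Nat) :
    ((List.range K).map (fun t : Nat => f (t : Int))).sum = ∑ j ∈ Finset.range K, f (j : Int) := rfl

theorem inner_fold_eq_pvW (k : Int) (a : List Int) (i : Int) :
    (PySem.List.pyRange 0 k 1).foldl
      (fun c j => c + (j + 1) * PySem.List.pyGetD a (i + j) 0) 0
    = pvW (fun t => PySem.List.pyGetD a t 0) k.toNat i := by
  rw [PySem.List.foldl_add (g := fun j => (j + 1) * PySem.List.pyGetD a (i + j) 0)]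
  rw [PySem.List.pyRange_one, List.map_map]
  simp only [Function.comp_def, zero_add, Int.sub_zero]
  exact sum_map_range_eq_finset (fun j => (j + 1) * PySem.List.pyGetD a (i + j) 0) k.toNat

-- A's running max over the first t window starts.
def pvMaxF (x : Int → Int) (k : Int) (t : Int) : Int :=
  (PySem.List.pyRange 0 t 1).foldl (fun ms i => max ms (pvW x k.toNat i)) 0

theorem pvMaxF_succ (x : Int → Int) (k m : Int) (hm : 0 ≤ m) :
    pvMaxF x k (m + 1) = max (pvMaxF x k m) (pvW x k.toNat m) := by
  unfold pvMaxF
  rw [PySem.List.pyRange_one_succ_right hm, List.foldl_append]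
  rfl

theorem A_eq_pvMaxF (n k : Int) (a : List Int) :
    max_score_subarray n k a = pvMaxF (fun t => PySem.List.pyGetD a t 0) k (n - k + 1) := by
  unfold max_score_subarray pvMaxF
  apply PySem.List.foldl_congr_mem
  intro acc i _
  rw [inner_fold_eq_pvW]

-- B's main fold invariant: after the windows with starts 0..m-1 have been processed,
-- the state is (pvW m, pvS m, running max over starts 0..m).
theorem B_fold_inv (k : Int) (a : List Int) (hk : 0 ≤ k) (m : Int) (hm : 0 ≤ m) :
    (PySem.List.pyRange 0 m 1).foldl
      (fun (s : Int × Int × Int) i =>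
        (s.1 - s.2.1 + k * PySem.List.pyGetD a (i + k) 0,
         s.2.1 - PySem.List.pyGetD a i 0 + PySem.List.pyGetD a (i + k) 0,
         max s.2.2 (s.1 - s.2.1 + k * PySem.List.pyGetD a (i + k) 0)))
      (pvW (fun t => PySem.List.pyGetD a t 0) k.toNat 0,
       pvS (fun t => PySem.List.pyGetD a t 0) k.toNat 0,
       pvMaxF (fun t => PySem.List.pyGetD a t 0) k 1)
    = (pvW (fun t => PySem.List.pyGetD a t 0) k.toNat m,
       pvS (fun t => PySem.List.pyGetD a t 0) k.toNat m,
       pvMaxF (fun t => PySem.List.pyGetD a t 0) k (m + 1)) := by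
  induction m, hm using Int.le_induction with
  | base => simp
  | succ m hm ih =>
    rw [PySem.List.pyRange_one_succ_right hm, List.foldl_append, ih]
    simp only [List.foldl_cons, List.foldl_nil]
    have hcast : ((k.toNat : Int)) = k := Int.toNat_of_nonneg hk
    have hW := pvW_succ (fun t => PySem.List.pyGetD a t 0) k.toNat m
    have hS := pvS_succ (fun t => PySem.List.pyGetD a t 0) k.toNat m
    rw [hcast] at hW hS
    rw [pvMaxF_succ _ _ _ (by omega : (0:Int) ≤ m + 1)]
    simp only [hW, hS]

theorem fold_max_zero (l : List Int) : l.foldl (fun ms (_ : Int) => max ms (0 : Int)) 0 = 0 := by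
  induction l with
  | nil => rfl
  | cons x t ih => simpa using ih

theorem cw_fst_eq (k : Int) (a : List Int) :
    (PySem.List.pyRange 0 k 1).foldl
      (fun c j => c + (j + 1) * PySem.List.pyGetD a j 0) 0
    = pvW (fun t => PySem.List.pyGetD a t 0) k.toNat 0 := by
  rw [← inner_fold_eq_pvW k a 0]
  apply PySem.List.foldl_congr_mem
  intro acc j _
  simp

theorem cw_snd_eq (k : Int) (a : List Int) :
    (PySem.List.pyRange 0 k 1).foldl
      (fun w j => w + PySem.List.pyGetD a j 0) 0
    = pvS (fun t => PySem.List.pyGetD a t 0) k.toNat 0 := by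
  rw [PySem.List.foldl_add (g := fun j => PySem.List.pyGetD a j 0)]
  rw [PySem.List.pyRange_one, List.map_map]
  simp only [Function.comp_def, zero_add, Int.sub_zero]
  have : pvS (fun t => PySem.List.pyGetD a t 0) k.toNat 0
      = ∑ j ∈ Finset.range k.toNat, PySem.List.pyGetD a (j : Int) 0 := by
    simp [pvS]
  rw [this]
  exact sum_map_range_eq_finset (fun j => PySem.List.pyGetD a j 0) k.toNat

theorem pvMaxF_one (x : Int → Int) (k : Int) :
    pvMaxF x k 1 = max 0 (pvW x k.toNat 0) := by
  have h := pvMaxF_succ x k 0 le_rfl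
  norm_num at h
  rw [h]
  have h0 : pvMaxF x k 0 = 0 := by
    unfold pvMaxF
    rw [PySem.List.pyRange_one_eq_nil le_rfl]
    rfl
  rw [h0]

-- ===== VERDICT (by name: the statement is the Claim_ definition above) =====
theorem max_score_subarray_spec : Claim_equal_max_score_subarray := by
  intro n k a _ _
  unfold Spec_max_score_subarray max_score_subarray_alt
  by_cases hc : k ≤ 0 ∨ n - k + 1 ≤ 0
  · rw [if_pos hc]
    unfold max_score_subarray
    rcases hc with hk | hn
    · have hin : PySem.List.pyRange 0 k 1 = [] :=
        PySem.List.pyRange_one_eq_nil (by omega)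
      rw [hin]
      simp only [List.foldl_nil]
      exact fold_max_zero _
    · rw [PySem.List.pyRange_one_eq_nil (by omega : n - k + 1 ≤ 0)]
      rfl
  · rw [if_neg hc]
    push Not at hc
    obtain ⟨hk, hn⟩ := hc
    dsimp only
    rw [PySem.List.foldl_prod_mk
          (f := fun c j => c + (j + 1) * PySem.List.pyGetD a j 0)
          (g := fun w j => w + PySem.List.pyGetD a j 0)]
    dsimp only
    rw [cw_fst_eq, cw_snd_eq, ← pvMaxF_one (fun t => PySem.List.pyGetD a t 0) k]
    rw [B_fold_inv k a (by omega) (n - k) (by omega)]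
    rw [A_eq_pvMaxF]
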